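-- pv_equiv track=rewrite | github.com/povijarrro/workspacepython | test.py | draw_stars_pyramid
-- ===== SOURCE A (Python) =====
-- def draw_stars_pyramid(n,filled=True):
--     res=""
--     if filled:
--          ch="*"
--     else:
--         ch=" "
--     for i in range(n):
--         if i<n-1:
--             res+=(n-1-i)*" "+"*"+(2*(i-1)+1)*ch
--             if i!=0: res+="*"
--             res+="\n"
--         else :
--             res+=(2*n-1)*"*"
--
--     return(res)
-- ===== SOURCE B (Python) =====
-- def draw_stars_pyramid(n, filled=True):
--     if n <= 0:
--         return ''
--     base = '*' * (2 * n - 1)          # solid bottom row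
--     rows = [base]
--     # the profile the peel works on: solid when filled, the hollow frame otherwise
--     row = base if filled or n == 1 else '*' + ' ' * (2 * n - 3) + '*'
--     for _ in range(n - 1):
--         # each row above loses one cell on each side (and gains a leading space);
--         # on a hollow frame the right-edge star is re-attached after the cut
--         row = ' ' + row[:-2] if filled else ' ' + row[:-3] + '*'
--         rows.append(row)
--     return '\n'.join(reversed(rows))
-- ===== Notes on version B (the rewrite author's own statement) =====
-- stated objective: alternative
-- what changed: A builds the picture top-down, recomputing each row from scratch by string-repetition arithmetic ((n-1-i)*' '+'*'+(2i-1)*ch+...); B builds it bottom-up from the solid base, deriving each row above from the previous one by constant-size string surgery (prepend a space, slice two cells off the end, re-attach the right-edge star of a hollow frame), then reverse-joins the collected rows.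
import Mathlib
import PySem

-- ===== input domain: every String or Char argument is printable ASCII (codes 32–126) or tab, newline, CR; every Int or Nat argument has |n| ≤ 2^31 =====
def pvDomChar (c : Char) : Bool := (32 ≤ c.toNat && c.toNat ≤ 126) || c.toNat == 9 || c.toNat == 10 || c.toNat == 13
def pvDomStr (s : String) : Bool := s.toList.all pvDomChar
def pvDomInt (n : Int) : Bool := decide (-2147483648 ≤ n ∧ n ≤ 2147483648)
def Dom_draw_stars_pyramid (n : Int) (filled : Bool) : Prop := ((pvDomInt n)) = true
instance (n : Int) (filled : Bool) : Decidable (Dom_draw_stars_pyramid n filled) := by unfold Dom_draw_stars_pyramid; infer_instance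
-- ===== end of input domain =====

-- B builds the pyramid bottom-up: each row is derived from the one below it by constant-size
-- string surgery (peel a cell off each side), rows are collected and reverse-joined
-- (objective: alternative decomposition, same asymptotic cost as A's top-down row arithmetic).

-- ===== PORT A =====
-- A's loop: one accumulated string; rows i < n-1 get spaces + "*" + (2(i-1)+1)*ch (+"*" if i≠0) + "\n",
-- the last row is (2n-1)*"*". Strings are handled as List Char and wrapped with String.ofList at the end.
def draw_stars_pyramid (n : Int) (filled : Bool) : String :=
  let ch : Char := if filled then '*' else ' '
  String.ofList ((PySem.List.pyRange 0 n 1).foldl (fun res i =>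
    if i < n - 1 then
      let r := res ++ PySem.List.pyRepeat [' '] (n - 1 - i) ++ ['*'] ++
                 PySem.List.pyRepeat [ch] (2 * (i - 1) + 1)
      let r := if i ≠ 0 then r ++ ['*'] else r
      r ++ ['\n']
    else
      res ++ PySem.List.pyRepeat ['*'] (2 * n - 1)) [])

-- ===== PORT B =====
-- Source B line by line: early '' for n ≤ 0; base row; the peel profile 'row' (base when filled or
-- n == 1, the hollow frame otherwise); n-1 peel steps, each appending the new row; reverse-join.
def draw_stars_pyramid_alt (n : Int) (filled : Bool) : String :=
  if n ≤ 0 then String.ofList []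
  else
    let base := PySem.List.pyRepeat ['*'] (2 * n - 1)
    let row := if filled || n == 1 then base
               else ['*'] ++ PySem.List.pyRepeat [' '] (2 * n - 3) ++ ['*']
    let st := (PySem.List.pyRange 0 (n - 1) 1).foldl
      (fun (st : List (List Char) × List Char) _ =>
        let row := if filled then ' ' :: PySem.List.slice st.2 none (some (-2))
                   else ' ' :: PySem.List.slice st.2 none (some (-3)) ++ ['*']
        (st.1 ++ [row], row)) ([base], row)
    String.ofList (PySem.Chars.join ['\n'] st.1.reverse)

-- ===== PRECONDITION & SPEC =====
def Spec_draw_stars_pyramid (n : Int) (filled : Bool) (out : String) : Prop := out = draw_stars_pyramid_alt n filled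
instance (n : Int) (filled : Bool) (out : String) : Decidable (Spec_draw_stars_pyramid n filled out) := by unfold Spec_draw_stars_pyramid; infer_instance

-- ===== CLAIM (what is proved, stated in full; the proofs are below) =====
def Claim_equal_draw_stars_pyramid : Prop := ∀ (n : Int) (filled : Bool), Dom_draw_stars_pyramid n filled → Spec_draw_stars_pyramid n filled (draw_stars_pyramid n filled)

-- ===== LEMMAS AND PROOFS =====

-- A's chunk for index i, as a function of i alone
def pvChunkA (n : Int) (ch : Char) (i : Int) : List Char :=
  if i < n - 1 then
    (PySem.List.pyRepeat [' '] (n - 1 - i) ++ ['*'] ++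
       PySem.List.pyRepeat [ch] (2 * (i - 1) + 1) ++
       (if i ≠ 0 then ['*'] else [])) ++ ['\n']
  else
    PySem.List.pyRepeat ['*'] (2 * n - 1)

-- the peel profile of level i: solid slope when filled, hollow frame otherwise
def pvFrame (n : Int) (filled : Bool) (i : Int) : List Char :=
  if filled then
    List.replicate (n - 1 - i).toNat ' ' ++ List.replicate (2 * i + 1).toNat '*'
  else
    List.replicate (n - 1 - i).toNat ' ' ++ ['*'] ++
      (if i = 0 then [] else List.replicate (2 * i - 1).toNat ' ' ++ ['*'])

-- the row B displays at level i (the bottom row is always solid)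
def pvRowOut (n : Int) (filled : Bool) (i : Int) : List Char :=
  if i = n - 1 then List.replicate (2 * n - 1).toNat '*' else pvFrame n filled i

-- one peel step (the loop body applied to a row)
def pvPeel (filled : Bool) (row : List Char) : List Char :=
  if filled then ' ' :: PySem.List.slice row none (some (-2))
  else ' ' :: PySem.List.slice row none (some (-3)) ++ ['*']

lemma pvFoldA_eq (n : Int) (ch : Char) :
    (PySem.List.pyRange 0 n 1).foldl (fun res i =>
      if i < n - 1 then
        let r := res ++ PySem.List.pyRepeat [' '] (n - 1 - i) ++ ['*'] ++
                   PySem.List.pyRepeat [ch] (2 * (i - 1) + 1)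
        let r := if i ≠ 0 then r ++ ['*'] else r
        r ++ ['\n']
      else
        res ++ PySem.List.pyRepeat ['*'] (2 * n - 1)) [] =
    (PySem.List.pyRange 0 n 1).flatMap (pvChunkA n ch) := by
  have h := PySem.List.foldl_append_eq_flatMap (l := PySem.List.pyRange 0 n 1)
      (g := pvChunkA n ch) (acc := [])
  rw [← List.nil_append ((PySem.List.pyRange 0 n 1).flatMap (pvChunkA n ch)), ← h]
  apply PySem.List.foldl_congr_mem
  intro acc i _
  simp only [pvChunkA]
  split_ifs with h1 h2 <;> simp [List.append_assoc]

lemma pvJoin_snoc (sep : List Char) (rs : List (List Char)) (x : List Char) :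
    PySem.Chars.join sep (rs ++ [x]) = rs.flatMap (· ++ sep) ++ x := by
  induction rs with
  | nil => simp [PySem.Chars.join_singleton]
  | cons a t ih =>
      cases t with
      | nil => simp [PySem.Chars.join_cons_cons, PySem.Chars.join_singleton, List.append_assoc]
      | cons b u =>
          simp only [List.cons_append, PySem.Chars.join_cons_cons] at ih ⊢
          simp [ih, List.append_assoc]

-- one peel step takes the frame of level i to the frame of level i-1
lemma pvPeel_frame (n : Int) (filled : Bool) (i : Int) (h1 : 1 ≤ i) (h2 : i ≤ n - 1) :
    pvPeel filled (pvFrame n filled i) = pvFrame n filled (i - 1) := by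
  cases filled
  · -- hollow: ' ' :: row[:-3] ++ ['*']
    have hiz : ¬ (i = 0) := by omega
    simp only [pvPeel, pvFrame, Bool.false_eq_true, if_false, hiz]
    rw [PySem.List.slice_to_neg_ofNat _ 3 (by omega)]
    by_cases hone : i = 1
    · subst hone
      have hz : ((1:Int) - 1 = 0) = True := by norm_num
      simp only [hz, ite_true]
      simp only [List.append_assoc]
      have hL : (List.replicate ((n:Int) - 1 - 1).toNat ' ' ++
          (['*'] ++ (List.replicate ((2 * 1 - 1 : Int)).toNat ' ' ++ ['*']))).length - 3 =
          (List.replicate ((n:Int) - 1 - 1).toNat ' ').length + 0 := by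
        simp
      rw [hL, List.take_length_add_append]
      have h8 : List.replicate (n.toNat - 1) ' ' = ' ' :: List.replicate (n.toNat - 1 - 1) ' ' := by
        rw [← List.replicate_succ]; congr 1; omega
      simp [h8]
    · have hiz' : ((i:Int) - 1 = 0) = False := by simp; omega
      simp only [hiz', ite_false]
      have hc : 2 ≤ (2 * i - 1).toNat := by omega
      have hL : (List.replicate (n - 1 - i).toNat ' ' ++ ['*'] ++
          (List.replicate (2 * i - 1).toNat ' ' ++ ['*'])).length - 3 =
          (List.replicate (n - 1 - i).toNat ' ' ++ ['*']).length + ((2 * i - 1).toNat - 2) := by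
        simp; omega
      rw [hL, List.take_length_add_append,
          List.take_append_of_le_length (by simp), List.take_replicate,
          Nat.min_eq_left (by omega)]
      have h5 : (2 * i - 1).toNat - 2 = (2 * (i - 1) - 1).toNat := by omega
      have h5' : (2 * i).toNat - 1 - 2 = (2 * (i - 1)).toNat - 1 := by omega
      have h7 : (n - i).toNat = (n - 1 - i).toNat + 1 := by omega
      simp [h5', h7, List.replicate_succ]
  · -- filled: ' ' :: row[:-2]
    simp only [pvPeel, pvFrame, if_pos]
    rw [PySem.List.slice_to_neg_ofNat _ 2 (by omega)]
    have hL : (List.replicate (n - 1 - i).toNat ' ' ++ List.replicate (2 * i + 1).toNat '*').length - 2 =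
        (List.replicate (n - 1 - i).toNat ' ').length + (2 * (i - 1) + 1).toNat := by
      simp; omega
    rw [hL, List.take_length_add_append, List.take_replicate,
        Nat.min_eq_left (by omega)]
    have h7 : (n - i).toNat = (n - 1 - i).toNat + 1 := by omega
    simp [h7, List.replicate_succ]

-- the start value of the loop is the frame of the bottom level
lemma pvStart_eq (n : Int) (filled : Bool) (hn : 1 ≤ n) :
    (if filled || n == 1 then List.replicate (2 * n - 1).toNat '*'
     else ['*'] ++ List.replicate (2 * n - 3).toNat ' ' ++ ['*']) =
    pvFrame n filled (n - 1) := by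
  cases filled
  · by_cases h1 : n = 1
    · subst h1; simp [pvFrame]
    · have : (n == (1:Int)) = false := by simp; omega
      simp only [pvFrame, Bool.false_eq_true, if_false, Bool.false_or, this]
      have hz : ¬ (n - 1 = 0) := by omega
      have e2 : (2 * (n - 1) - 1 : Int).toNat = (2 * n - 3 : Int).toNat := by omega
      simp [hz, e2]
  · simp only [pvFrame, if_pos, Bool.true_or]
    have e2 : (2 * (n - 1) + 1 : Int).toNat = (2 * n - 1 : Int).toNat := by omega
    simp [e2]

-- loop invariant: after k peel steps the collected rows are the displayed rows of the bottom
-- k+1 levels (in bottom-up order) and the profile is the frame of level n-1-k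
lemma pvFoldB (n : Int) (filled : Bool) (k : Nat) (hk : (k : Int) ≤ n - 1) :
    (PySem.List.pyRange 0 (k : Int) 1).foldl
      (fun (st : List (List Char) × List Char) _ =>
        (st.1 ++ [if filled then ' ' :: PySem.List.slice st.2 none (some (-2))
                  else ' ' :: PySem.List.slice st.2 none (some (-3)) ++ ['*']],
         if filled then ' ' :: PySem.List.slice st.2 none (some (-2))
         else ' ' :: PySem.List.slice st.2 none (some (-3)) ++ ['*']))
      ([List.replicate (2 * n - 1).toNat '*'], pvFrame n filled (n - 1)) =
    (((PySem.List.pyRange (n - 1 - k) n 1).map (pvRowOut n filled)).reverse,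
      pvFrame n filled (n - 1 - k)) := by
  induction k with
  | zero =>
      rw [PySem.List.pyRange_one_eq_nil (by norm_num)]
      have hs : PySem.List.pyRange (n - 1) n 1 = [n - 1] := by
        rw [PySem.List.pyRange_one_cons (by omega), PySem.List.pyRange_one_eq_nil (by omega)]
      simp [hs, pvRowOut]
  | succ m ih =>
      have hm : (m : Int) ≤ n - 1 := by push_cast at hk ⊢; omega
      rw [show ((m + 1 : Nat) : Int) = (m : Int) + 1 by push_cast; ring,
          PySem.List.pyRange_one_succ_right (by positivity), List.foldl_append,
          ih hm, List.foldl_cons, List.foldl_nil]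
      have hpeel : pvPeel filled (pvFrame n filled (n - 1 - m)) = pvFrame n filled (n - 1 - (m + 1 : Nat)) := by
        have := pvPeel_frame n filled (n - 1 - m) (by push_cast at hk; omega) (by omega)
        rw [this]; congr 1; push_cast; ring
      have hlt : (n - 1 - (m + 1 : Nat) : Int) < n - 1 := by push_cast; omega
      have hout : pvFrame n filled (n - 1 - (m + 1 : Nat)) = pvRowOut n filled (n - 1 - (m + 1 : Nat)) := by
        rw [pvRowOut, if_neg (by omega)]
      have hrange : PySem.List.pyRange (n - 1 - (m + 1 : Nat)) n 1 =
          (n - 1 - (m + 1 : Nat)) :: PySem.List.pyRange (n - 1 - m) n 1 := by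
        rw [PySem.List.pyRange_one_cons (by omega)]
        congr 1; push_cast; ring
      simp only [pvPeel] at hpeel
      simp only [hpeel]
      have hc : (n - 1 - ((m : Int) + 1)) = n - 1 - (((m + 1 : Nat)) : Int) := by push_cast; ring
      rw [hc, hrange, List.map_cons, List.reverse_cons, hout]

-- A's row chunk is B's displayed row (plus newline) for the upper rows …
lemma pvChunk_row (n : Int) (filled : Bool) (i : Int) (h0 : 0 ≤ i) (h1 : i < n - 1) :
    pvChunkA n (if filled then '*' else ' ') i = pvRowOut n filled i ++ ['\n'] := by
  have hne : ¬ (i = n - 1) := by omega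
  simp only [pvChunkA, pvRowOut, pvFrame, if_pos h1, hne, ite_false,
    PySem.List.pyRepeat_singleton]
  by_cases hz : i = 0
  · subst hz
    cases filled <;> simp
  · have h1i : 1 ≤ i := by omega
    cases filled
    · simp only [Bool.false_eq_true, ite_false, hz]
      have hc : (2 * (i - 1) + 1).toNat = (2 * i - 1).toNat := by omega
      simp [hz, hc]
    · simp only [ite_true]
      have hk : (2 * i + 1).toNat = (2 * (i - 1) + 1).toNat + 1 + 1 := by omega
      rw [hk, List.replicate_succ, List.replicate_succ']
      simp [hz]

-- … and exactly its bottom row there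
lemma pvChunk_last (n : Int) (ch : Char) (hn : 1 ≤ n) (filled : Bool) :
    pvChunkA n ch (n - 1) = pvRowOut n filled (n - 1) := by
  simp [pvChunkA, pvRowOut, PySem.List.pyRepeat_singleton]

-- A's concatenated chunks are B's rows joined with newlines
lemma pvMain (n : Int) (filled : Bool) :
    (PySem.List.pyRange 0 n 1).flatMap (pvChunkA n (if filled then '*' else ' ')) =
    PySem.Chars.join ['\n'] ((PySem.List.pyRange 0 n 1).map (pvRowOut n filled)) := by
  by_cases hn : n ≤ 0
  · rw [PySem.List.pyRange_one_eq_nil (by omega)]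
    simp [PySem.Chars.join_nil]
  · have hsplit : PySem.List.pyRange 0 n 1 = PySem.List.pyRange 0 (n-1) 1 ++ [n-1] := by
      have := PySem.List.pyRange_one_succ_right (a := 0) (b := n - 1) (by omega)
      simpa using this
    rw [hsplit, List.map_append, List.map_singleton, pvJoin_snoc, List.flatMap_append]
    have hrows : ∀ i ∈ PySem.List.pyRange 0 (n-1) 1,
        pvChunkA n (if filled then '*' else ' ') i = pvRowOut n filled i ++ ['\n'] := by
      intro i hi
      rw [PySem.List.mem_pyRange_one] at hi
      exact pvChunk_row n filled i hi.1 hi.2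
    congr 1
    · calc (PySem.List.pyRange 0 (n-1) 1).flatMap (pvChunkA n (if filled then '*' else ' '))
          = ((PySem.List.pyRange 0 (n-1) 1).map (pvChunkA n (if filled then '*' else ' '))).flatten := by
            rw [List.flatMap_def]
        _ = ((PySem.List.pyRange 0 (n-1) 1).map (fun i => pvRowOut n filled i ++ ['\n'])).flatten := by
            rw [List.map_congr_left hrows]
        _ = ((PySem.List.pyRange 0 (n-1) 1).map (pvRowOut n filled)).flatMap (· ++ ['\n']) := by
            rw [List.flatMap_def, List.map_map]; rfl
    · simpa using pvChunk_last n (if filled then '*' else ' ') (by omega) filled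

-- ===== VERDICT (by name: the statement is the Claim_ definition above) =====
theorem draw_stars_pyramid_spec : Claim_equal_draw_stars_pyramid := by
  intro n filled _
  unfold Spec_draw_stars_pyramid
  by_cases hn : n ≤ 0
  · unfold draw_stars_pyramid draw_stars_pyramid_alt
    rw [if_pos hn, PySem.List.pyRange_one_eq_nil (by omega)]
    simp
  · have hA : draw_stars_pyramid n filled =
        String.ofList ((PySem.List.pyRange 0 n 1).flatMap (pvChunkA n (if filled then '*' else ' '))) := by
      unfold draw_stars_pyramid
      exact congrArg String.ofList (pvFoldA_eq n (if filled then '*' else ' '))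
    have hcast : (((n - 1).toNat : Nat) : Int) = n - 1 := by omega
    have hB : draw_stars_pyramid_alt n filled =
        String.ofList (PySem.Chars.join ['\n'] ((PySem.List.pyRange 0 n 1).map (pvRowOut n filled))) := by
      unfold draw_stars_pyramid_alt
      rw [if_neg hn]
      simp only [PySem.List.pyRepeat_singleton, pvStart_eq n filled (by omega)]
      rw [show PySem.List.pyRange 0 (n - 1) 1
            = PySem.List.pyRange 0 (((n - 1).toNat : Nat) : Int) 1 by rw [hcast],
          pvFoldB n filled (n - 1).toNat (by rw [hcast]),
          hcast, show (n - 1 - (n - 1) : Int) = 0 by ring, List.reverse_reverse]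
    rw [hA, hB]
    exact congrArg String.ofList (pvMain n filled)
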